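-- pv_equiv track=rewrite | github.com/Jibux/playbooks | roles/jibux_svc/files/jibux_svc_pre_start.py | extract_matching_iface
-- ===== SOURCE A (Python) =====
-- def extract_matching_iface(conf, ip_router_info):
--     matching_ifaces = [iface for (iface, _, router_mac) in ip_router_info if conf.get('mac') == router_mac]
--     if len(matching_ifaces) > 0:
--         for iface in matching_ifaces:
--             if conf.get('iface') == iface:
--                 return iface
--         # Defaults to the first interface
--         return matching_ifaces[0]
--     return None
-- ===== SOURCE B (Python) =====
-- def extract_matching_iface(conf, ip_router_info):
--     mac = conf.get('mac')
--     pref = conf.get('iface')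
--     first_match = None
--     for iface, _, router_mac in ip_router_info:
--         if mac != router_mac:
--             continue
--         if pref == iface:
--             return iface
--         if first_match is None:
--             first_match = iface
--     return first_match
-- ===== Notes on version B (the rewrite author's own statement) =====
-- stated objective: simpler
-- what changed: Replaced the build-a-matching-list-then-rescan structure with a single fused loop that returns the preferred iface immediately and otherwise remembers only the first match in one variable.
import Mathlib
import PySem

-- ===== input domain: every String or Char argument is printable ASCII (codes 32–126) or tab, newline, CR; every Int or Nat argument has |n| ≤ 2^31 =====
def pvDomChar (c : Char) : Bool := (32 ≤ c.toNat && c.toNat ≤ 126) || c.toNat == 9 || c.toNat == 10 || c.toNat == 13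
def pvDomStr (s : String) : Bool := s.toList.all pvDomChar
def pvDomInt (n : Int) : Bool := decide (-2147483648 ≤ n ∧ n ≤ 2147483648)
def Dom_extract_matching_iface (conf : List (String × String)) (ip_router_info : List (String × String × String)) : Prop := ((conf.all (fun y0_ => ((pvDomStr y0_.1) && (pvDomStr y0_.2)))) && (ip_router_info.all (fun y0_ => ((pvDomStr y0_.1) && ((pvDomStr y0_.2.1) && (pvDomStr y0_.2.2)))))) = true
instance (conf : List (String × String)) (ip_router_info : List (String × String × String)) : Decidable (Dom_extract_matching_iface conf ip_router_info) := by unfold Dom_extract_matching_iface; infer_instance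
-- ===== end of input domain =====

-- ===== PORT A =====
-- B fuses A's list comprehension + rescan loop into one pass with a first-match variable (objective: simpler).
def extract_matching_iface (conf : List (String × String)) (ip_router_info : List (String × String × String)) : Option String :=
  -- matching_ifaces = [iface for (iface, _, router_mac) in ip_router_info if conf.get('mac') == router_mac]
  let matching_ifaces : List String :=
    (ip_router_info.filter (fun t => PySem.Dict.get? (PySem.Dict.mk conf) "mac" == some t.2.2)).map (fun t => t.1)
  if matching_ifaces.length > 0 then
    -- for iface in matching_ifaces: if conf.get('iface') == iface: return iface
    match matching_ifaces.find? (fun iface => PySem.Dict.get? (PySem.Dict.mk conf) "iface" == some iface) with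
    | some iface => some iface
    | none => PySem.List.pyGet? matching_ifaces 0  -- matching_ifaces[0]
  else none

-- ===== PORT B =====
def emiLoop (mac pref : Option String) (first_match : Option String) : List (String × String × String) → Option String
  | [] => first_match
  | (iface, _, router_mac) :: rest =>
    if mac == some router_mac then
      if pref == some iface then some iface
      else emiLoop mac pref (if first_match.isNone then some iface else first_match) rest
    else emiLoop mac pref first_match rest

def extract_matching_iface_alt (conf : List (String × String)) (ip_router_info : List (String × String × String)) : Option String :=
  emiLoop (PySem.Dict.get? (PySem.Dict.mk conf) "mac") (PySem.Dict.get? (PySem.Dict.mk conf) "iface") none ip_router_info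

-- ===== PRECONDITION & SPEC =====
def Spec_extract_matching_iface (conf : List (String × String)) (ip_router_info : List (String × String × String)) (out : Option String) : Prop := out = extract_matching_iface_alt conf ip_router_info
instance (conf : List (String × String)) (ip_router_info : List (String × String × String)) (out : Option String) : Decidable (Spec_extract_matching_iface conf ip_router_info out) := by unfold Spec_extract_matching_iface; infer_instance

-- ===== CLAIM =====
def Claim_equal_extract_matching_iface : Prop := ∀ (conf : List (String × String)) (ip_router_info : List (String × String × String)), Dom_extract_matching_iface conf ip_router_info → Spec_extract_matching_iface conf ip_router_info (extract_matching_iface conf ip_router_info)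

-- ===== LEMMAS AND PROOFS =====
theorem emiLoop_eq (mac pref : Option String) (info : List (String × String × String)) (first : Option String) :
    emiLoop mac pref first info =
      (let matching := (info.filter (fun t => mac == some t.2.2)).map (fun t => t.1)
       match matching.find? (fun iface => pref == some iface) with
       | some i => some i
       | none => Option.or first matching.head?) := by
  induction info generalizing first with
  | nil => simp [emiLoop]
  | cons hd tl ih =>
    obtain ⟨iface, mid, rmac⟩ := hd
    by_cases hm : mac == some rmac
    · by_cases hp : pref == some iface
      · simp [emiLoop, hm, hp, List.find?]
      · simp only [emiLoop, hm, hp, if_true, if_false, List.filter_cons, List.map_cons,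
          List.find?, ih]
        cases hfind : ((tl.filter (fun t => mac == some t.2.2)).map (fun t => t.1)).find?
            (fun i => pref == some i) with
        | some i => simp [hfind]
        | none =>
          cases first <;> simp [hfind, Option.isNone, Option.or]
    · simp only [emiLoop, hm, if_false, List.filter_cons, ih]
      simp [hm]

theorem extract_matching_iface_spec : Claim_equal_extract_matching_iface := by
  intro conf info _
  unfold Spec_extract_matching_iface extract_matching_iface extract_matching_iface_alt
  rw [emiLoop_eq]
  simp only []
  set matching := (info.filter (fun t => PySem.Dict.get? (PySem.Dict.mk conf) "mac" == some t.2.2)).map (fun t => t.1) with hm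
  cases hfind : matching.find? (fun iface => PySem.Dict.get? (PySem.Dict.mk conf) "iface" == some iface) with
  | some i =>
    have : matching ≠ [] := by intro h; rw [h] at hfind; simp at hfind
    simp [hfind, List.length_pos_iff.mpr this]
  | none =>
    cases matching with
    | nil => simp [hfind]
    | cons a t => simp [hfind, PySem.List.pyGet?, PySem.List.pyIdx?, Option.or]
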